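-- pv_equiv track=rewrite | github.com/zhizinan1997/pic-gate | app/services/url_builder.py | parse_forwarded_header
-- ===== SOURCE A (Python) =====
-- from typing import Optional
--
-- def parse_forwarded_header(forwarded: str) -> tuple[Optional[str], Optional[str]]:
--     """
--     Parse RFC 7239 Forwarded header.
--     Returns (proto, host) tuple.
--     Example: Forwarded: for=192.0.2.60;proto=https;host=example.com
--     """
--     proto = None
--     host = None
--
--     for part in forwarded.split(";"):
--         part = part.strip()
--         if part.lower().startswith("proto="):
--             proto = part[6:].strip()
--         elif part.lower().startswith("host="):
--             host = part[5:].strip()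
--
--     return proto, host
-- ===== SOURCE B (Python) =====
-- from typing import Optional
--
-- def parse_forwarded_header(forwarded: str) -> tuple[Optional[str], Optional[str]]:
--     """Generic parse: collect ALL key=value parameters of the header into a dict
--     (split each ';'-part at its first '=', lowercase the key, last wins), then
--     simply look up 'proto' and 'host'."""
--     params = {}
--     for part in forwarded.split(";"):
--         key, sep, value = part.strip().partition("=")
--         if sep:
--             params[key.lower()] = value.strip()
--     return params.get("proto"), params.get("host")
-- ===== Notes on version B (the rewrite author's own statement) =====
-- stated objective: alternative
-- what changed: A selects proto/host inline with a prefix-test if/elif chain mutating two accumulators; B parses the whole header generically into a key->value dict (partition each part at its first '=', lowercase key, last wins) and only afterwards looks up 'proto' and 'host'.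
import Mathlib
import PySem

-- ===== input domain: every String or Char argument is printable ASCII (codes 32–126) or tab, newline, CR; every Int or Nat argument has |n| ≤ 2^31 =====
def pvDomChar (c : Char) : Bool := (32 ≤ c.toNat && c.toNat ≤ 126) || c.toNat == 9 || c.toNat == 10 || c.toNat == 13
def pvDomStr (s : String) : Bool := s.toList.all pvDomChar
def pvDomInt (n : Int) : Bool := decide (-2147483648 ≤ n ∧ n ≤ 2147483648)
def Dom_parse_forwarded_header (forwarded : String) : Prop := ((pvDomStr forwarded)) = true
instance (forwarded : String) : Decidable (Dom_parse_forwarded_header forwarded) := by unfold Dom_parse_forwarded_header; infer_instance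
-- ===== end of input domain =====

-- B replaces A's inline proto/host selection (if/elif prefix tests mutating two accumulators)
-- by a generic parse of ALL key=value parameters into a dict followed by two lookups.

-- ===== PORT A =====
def parse_forwarded_header (forwarded : String) : Option String × Option String :=
  ((PySem.Str.split? forwarded ";").getD []).foldl
    (fun (acc : Option String × Option String) part0 =>
      let part := PySem.Str.strip part0
      if PySem.Str.startswith (PySem.Str.lower part) "proto=" then
        (some (PySem.Str.strip (PySem.Str.slice part (some 6) none)), acc.2)
      else if PySem.Str.startswith (PySem.Str.lower part) "host=" then
        (acc.1, some (PySem.Str.strip (PySem.Str.slice part (some 5) none)))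
      else acc)
    (none, none)

-- ===== PORT B =====
-- hand port of Python's str.partition("=") for the single-character separator "=":
-- exact, since Python splits at the FIRST '=' — head = chars before it, tail = chars after it
def pvPartEq (cs : List Char) : List Char × Bool × List Char :=
  let head := cs.takeWhile (fun c => c != '=')
  match cs.dropWhile (fun c => c != '=') with
  | [] => (head, false, [])
  | _ :: t => (head, true, t)

def parse_forwarded_header_alt (forwarded : String) : Option String × Option String :=
  let params := ((PySem.Str.split? forwarded ";").getD []).foldl
    (fun (d : PySem.Dict (List Char) (List Char)) part =>
      let r := pvPartEq (PySem.Str.strip part).toList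
      if r.2.1 then d.insert (PySem.Chars.lower r.1) (PySem.Chars.strip r.2.2) else d)
    PySem.Dict.empty
  ((params.get? "proto".toList).map String.ofList,
   (params.get? "host".toList).map String.ofList)

-- ===== PRECONDITION & SPEC =====
def Spec_parse_forwarded_header (forwarded : String) (out : Option String × Option String) : Prop := out = parse_forwarded_header_alt forwarded
instance (forwarded : String) (out : Option String × Option String) : Decidable (Spec_parse_forwarded_header forwarded out) := by unfold Spec_parse_forwarded_header; infer_instance

-- ===== CLAIM =====
def Claim_equal_parse_forwarded_header : Prop := ∀ (forwarded : String), Dom_parse_forwarded_header forwarded → Spec_parse_forwarded_header forwarded (parse_forwarded_header forwarded)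

-- ===== LEMMAS AND PROOFS =====

-- lowering a character cannot create or destroy an '='
theorem pv_lowerChar_bne (c : Char) :
    (PySem.Chars.lowerChar c != '=') = (c != '=') := by
  unfold PySem.Chars.lowerChar PySem.Chars.isupper
  split_ifs with h
  · simp only [Bool.and_eq_true, decide_eq_true_eq] at h
    have h1 : 65 ≤ c.toNat := h.1
    have h2 : c.toNat ≤ 90 := h.2
    have hv : (Char.ofNat (c.toNat + 32)).toNat = c.toNat + 32 := by
      rw [Char.toNat_ofNat, if_pos]
      exact Or.inl (by omega)
    have hne1 : Char.ofNat (c.toNat + 32) ≠ '=' := by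
      intro he
      have := congrArg Char.toNat he
      rw [hv] at this
      have h61 : ('=' : Char).toNat = 61 := by decide
      omega
    have hne2 : c ≠ '=' := by
      intro he; subst he
      have : ('=' : Char).toNat = 61 := by decide
      omega
    rw [show (Char.ofNat (c.toNat + 32) != '=') = true from bne_iff_ne.mpr hne1,
        show (c != '=') = true from bne_iff_ne.mpr hne2]
  · rfl

-- the prefix test against "key=" succeeds iff partitioning at the first '=' yields exactly key
theorem pv_core (key : List Char) (hk : '=' ∉ key) : ∀ ds : List Char,
    (PySem.Chars.startswith ds (key ++ ['=']) = true) ↔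
      (ds.takeWhile (fun c => c != '=') = key ∧ ds.dropWhile (fun c => c != '=') ≠ []) := by
  induction key with
  | nil =>
    intro ds
    cases ds with
    | nil => simp [PySem.Chars.startswith_iff]
    | cons c t =>
      by_cases hc : c = '='
      · subst hc
        simp [PySem.Chars.startswith_iff, List.cons_prefix_cons]
      · simp [PySem.Chars.startswith_iff, List.cons_prefix_cons, hc, Ne.symm hc]
  | cons k ks ih =>
    have hk1 : k ≠ '=' := fun he => hk (he ▸ List.mem_cons_self)
    have hk2 : '=' ∉ ks := fun hm => hk (List.mem_cons_of_mem _ hm)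
    intro ds
    cases ds with
    | nil => simp [PySem.Chars.startswith_iff]
    | cons c t =>
      by_cases hc : c = '='
      · subst hc
        simp [PySem.Chars.startswith_iff, List.cons_prefix_cons]
        intro he
        exact absurd he hk1
      · have := ih hk2 t
        simp only [PySem.Chars.startswith_iff] at this ⊢
        simp [List.cons_prefix_cons, hc, this]
        tauto

-- the same through lower: A's test on a part ≡ B's partition producing exactly key (lowercased)
theorem pv_test (cs key : List Char) (hk : '=' ∉ key) :
    (PySem.Chars.startswith (PySem.Chars.lower cs) (key ++ ['=']) = true) ↔
      (PySem.Chars.lower (cs.takeWhile (fun c => c != '=')) = key ∧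
       cs.dropWhile (fun c => c != '=') ≠ []) := by
  rw [pv_core key hk]
  unfold PySem.Chars.lower
  rw [List.takeWhile_map, List.dropWhile_map]
  rw [show ((fun c => c != '=') ∘ PySem.Chars.lowerChar) = (fun c => c != '=') from
        funext fun c => pv_lowerChar_bne c]
  simp

-- when the key before the first '=' has length n, A's slice past "key=" is the partition's tail
theorem pv_value (cs : List Char) (n : Nat)
    (hlen : (cs.takeWhile (fun c => c != '=')).length = n) :
    cs.drop (n + 1) = (cs.dropWhile (fun c => c != '=')).tail := by
  conv_lhs => rw [← List.takeWhile_append_dropWhile (p := fun c => c != '=') (l := cs)]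
  rw [show n + 1 = (cs.takeWhile (fun c => c != '=')).length + 1 from by omega,
      List.drop_append]
  cases cs.dropWhile (fun c => c != '=') <;> simp

-- one part: A's if/elif step, started from the dict's current proto/host view, equals B's dict step
theorem pv_step_core (d : PySem.Dict (List Char) (List Char)) (sp : String) :
    (if PySem.Str.startswith (PySem.Str.lower sp) "proto=" then
          (some (PySem.Str.strip (PySem.Str.slice sp (some 6) none)),
           (d.get? "host".toList).map String.ofList)
        else if PySem.Str.startswith (PySem.Str.lower sp) "host=" then
          ((d.get? "proto".toList).map String.ofList,
           some (PySem.Str.strip (PySem.Str.slice sp (some 5) none)))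
        else ((d.get? "proto".toList).map String.ofList, (d.get? "host".toList).map String.ofList)) =
       (let D := if (pvPartEq sp.toList).2.1 then
            d.insert (PySem.Chars.lower (pvPartEq sp.toList).1)
                     (PySem.Chars.strip (pvPartEq sp.toList).2.2)
          else d
        ((D.get? "proto".toList).map String.ofList, (D.get? "host".toList).map String.ofList)) := by
  have hpk : ('=' ∉ "proto".toList) := by decide
  have hhk : ('=' ∉ "host".toList) := by decide
  have hsp : PySem.Str.startswith (PySem.Str.lower sp) "proto=" =
      PySem.Chars.startswith (PySem.Chars.lower sp.toList) ("proto".toList ++ ['=']) := by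
    rw [PySem.Str.startswith_eq, PySem.Str.toList_lower,
        show ("proto=".toList) = "proto".toList ++ ['='] from by decide]
  have hsh : PySem.Str.startswith (PySem.Str.lower sp) "host=" =
      PySem.Chars.startswith (PySem.Chars.lower sp.toList) ("host".toList ++ ['=']) := by
    rw [PySem.Str.startswith_eq, PySem.Str.toList_lower,
        show ("host=".toList) = "host".toList ++ ['='] from by decide]
  by_cases hdw : sp.toList.dropWhile (fun c => c != '=') = []
  · have hp : PySem.Str.startswith (PySem.Str.lower sp) "proto=" = false := by
      rw [hsp, Bool.eq_false_iff]; intro h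
      exact ((pv_test _ _ hpk).mp h).2 hdw
    have hh : PySem.Str.startswith (PySem.Str.lower sp) "host=" = false := by
      rw [hsh, Bool.eq_false_iff]; intro h
      exact ((pv_test _ _ hhk).mp h).2 hdw
    have hr : (pvPartEq sp.toList).2.1 = false := by
      unfold pvPartEq; rw [hdw]
    simp only [hp, hh, hr, Bool.false_eq_true, if_false]
  · obtain ⟨d0, dt, hd⟩ := List.exists_cons_of_ne_nil hdw
    have hr : pvPartEq sp.toList =
        (sp.toList.takeWhile (fun c => c != '='), true, dt) := by
      unfold pvPartEq; rw [hd]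
    by_cases hp : PySem.Chars.lower (sp.toList.takeWhile (fun c => c != '=')) = "proto".toList
    · have htest : PySem.Str.startswith (PySem.Str.lower sp) "proto=" = true := by
        rw [hsp]; exact (pv_test _ _ hpk).mpr ⟨hp, hdw⟩
      have hlen : (sp.toList.takeWhile (fun c => c != '=')).length = 5 := by
        have := congrArg List.length hp
        simpa [PySem.Chars.lower] using this
      have hval : PySem.Str.strip (PySem.Str.slice sp (some 6) none) =
          String.ofList (PySem.Chars.strip dt) := by
        have h1 : (PySem.Str.strip (PySem.Str.slice sp (some 6) none)).toList =
            PySem.Chars.strip dt := by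
          rw [PySem.Str.toList_strip, PySem.Str.toList_slice, PySem.Chars.slice_eq_listSlice]
          rw [PySem.List.slice_from sp.toList (a := 6) (by norm_num)]
          rw [show ((6:Int).toNat) = 5 + 1 from by decide, pv_value _ 5 hlen, hd]
          rfl
        rw [← h1]
        exact String.ofList_toList.symm
      simp only [htest, if_true, hr, hp]
      rw [PySem.Dict.get?_insert_self,
          PySem.Dict.get?_insert_of_ne _ _ (by decide : "host".toList ≠ "proto".toList)]
      simp [hval]
    · by_cases hh : PySem.Chars.lower (sp.toList.takeWhile (fun c => c != '=')) = "host".toList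
      · have htest : PySem.Str.startswith (PySem.Str.lower sp) "host=" = true := by
          rw [hsh]; exact (pv_test _ _ hhk).mpr ⟨hh, hdw⟩
        have hptest : PySem.Str.startswith (PySem.Str.lower sp) "proto=" = false := by
          rw [hsp, Bool.eq_false_iff]; intro h
          exact hp ((pv_test _ _ hpk).mp h).1
        have hlen : (sp.toList.takeWhile (fun c => c != '=')).length = 4 := by
          have := congrArg List.length hh
          simpa [PySem.Chars.lower] using this
        have hval : PySem.Str.strip (PySem.Str.slice sp (some 5) none) =
            String.ofList (PySem.Chars.strip dt) := by
          have h1 : (PySem.Str.strip (PySem.Str.slice sp (some 5) none)).toList =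
              PySem.Chars.strip dt := by
            rw [PySem.Str.toList_strip, PySem.Str.toList_slice, PySem.Chars.slice_eq_listSlice]
            rw [PySem.List.slice_from sp.toList (a := 5) (by norm_num)]
            rw [show ((5:Int).toNat) = 4 + 1 from by decide, pv_value _ 4 hlen, hd]
            rfl
          rw [← h1]
          exact String.ofList_toList.symm
        simp only [htest, hptest, if_true, Bool.false_eq_true, if_false, hr, hh]
        rw [PySem.Dict.get?_insert_self,
            PySem.Dict.get?_insert_of_ne _ _ (by decide : "proto".toList ≠ "host".toList)]
        simp [hval]
      · have hptest : PySem.Str.startswith (PySem.Str.lower sp) "proto=" = false := by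
          rw [hsp, Bool.eq_false_iff]; intro h
          exact hp ((pv_test _ _ hpk).mp h).1
        have hhtest : PySem.Str.startswith (PySem.Str.lower sp) "host=" = false := by
          rw [hsh, Bool.eq_false_iff]; intro h
          exact hh ((pv_test _ _ hhk).mp h).1
        simp only [hptest, hhtest, Bool.false_eq_true, if_false, hr, if_true]
        rw [PySem.Dict.get?_insert_of_ne _ _ (fun he => hp he.symm),
            PySem.Dict.get?_insert_of_ne _ _ (fun he => hh he.symm)]

-- the two folds stay in lock-step: A's pair is always the dict's (proto, host) view
theorem pv_fold (l : List String) : ∀ d : PySem.Dict (List Char) (List Char),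
    l.foldl
      (fun (acc : Option String × Option String) part0 =>
        let part := PySem.Str.strip part0
        if PySem.Str.startswith (PySem.Str.lower part) "proto=" then
          (some (PySem.Str.strip (PySem.Str.slice part (some 6) none)), acc.2)
        else if PySem.Str.startswith (PySem.Str.lower part) "host=" then
          (acc.1, some (PySem.Str.strip (PySem.Str.slice part (some 5) none)))
        else acc)
      ((d.get? "proto".toList).map String.ofList, (d.get? "host".toList).map String.ofList) =
    (let D := l.foldl
        (fun (d : PySem.Dict (List Char) (List Char)) part =>
          let r := pvPartEq (PySem.Str.strip part).toList
          if r.2.1 then d.insert (PySem.Chars.lower r.1) (PySem.Chars.strip r.2.2) else d) d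
     ((D.get? "proto".toList).map String.ofList, (D.get? "host".toList).map String.ofList)) := by
  induction l with
  | nil => intro d; rfl
  | cons x t ih =>
    intro d
    rw [List.foldl_cons, List.foldl_cons]
    simp only []
    rw [pv_step_core d (PySem.Str.strip x)]
    simp only []
    exact ih _

-- ===== VERDICT =====
theorem parse_forwarded_header_spec : Claim_equal_parse_forwarded_header := by
  intro forwarded _
  unfold Spec_parse_forwarded_header parse_forwarded_header parse_forwarded_header_alt
  have h := pv_fold (((PySem.Str.split? forwarded ";").getD [])) PySem.Dict.empty
  simpa using h
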